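-- pv_equiv track=rewrite | github.com/jaw653/cyberTools | pingScanner.py | trimIP
-- ===== SOURCE A (Python) =====
-- def trimIP(ip):
-- 	'''
-- 	Trims IP address to last decimal for concat
--
-- 	Keyword Arguments:
-- 	ip - IP address to trim as a string
--
-- 	return - trimmed IP
-- 	'''
-- 	trimmed = ''
--
-- 	numPeriods = 0
-- 	s = len(ip)
-- 	for i in range(0, s):
-- 		if numPeriods == 3:
-- 			break
--
-- 		if ip[i] == '.':
-- 			numPeriods = numPeriods + 1
--
-- 		trimmed = trimmed + ip[i]
--
-- 	return trimmed
-- ===== SOURCE B (Python) =====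
-- def trimIP(ip):
--     parts = ip.split('.')
--     if len(parts) > 3:
--         return '.'.join(parts[:3]) + '.'
--     return ip
-- ===== Notes on version B (the rewrite author's own statement) =====
-- stated objective: faster
-- what changed: Replaces A's character-by-character accumulation loop (repeated string concatenation, counting periods and breaking after the third) with tokenize-then-rejoin: split the string on the period character, rejoin the first three fields with a trailing period, or return the string unchanged when it has fewer than three periods.
import Mathlib
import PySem

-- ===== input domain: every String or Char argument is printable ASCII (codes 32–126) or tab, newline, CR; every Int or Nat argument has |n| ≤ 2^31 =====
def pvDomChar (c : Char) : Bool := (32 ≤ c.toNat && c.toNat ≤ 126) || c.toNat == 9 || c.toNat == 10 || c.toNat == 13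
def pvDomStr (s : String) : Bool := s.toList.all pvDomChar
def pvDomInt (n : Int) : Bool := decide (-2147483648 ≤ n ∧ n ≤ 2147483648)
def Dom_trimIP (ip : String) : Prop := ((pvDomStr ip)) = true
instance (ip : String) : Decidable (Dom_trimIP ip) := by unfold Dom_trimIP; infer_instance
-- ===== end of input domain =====

-- B replaces A's character-by-character accumulation loop with split-on-period/rejoin (simpler); return values are proved equal on all inputs.

-- ===== PORT A =====
-- A's loop: walk the characters, counting periods, breaking once the count reaches 3,
-- appending each visited character to the accumulator `trimmed`.
def trimGo : List Char → Nat → List Char → List Char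
  | [], _, trimmed => trimmed
  | c :: rest, numPeriods, trimmed =>
    if numPeriods = 3 then trimmed
    else trimGo rest (if c = '.' then numPeriods + 1 else numPeriods) (trimmed ++ [c])

def trimIP (ip : String) : String := String.ofList (trimGo ip.toList 0 [])

-- ===== PORT B =====
-- parts = ip.split('.'); if len(parts) > 3: return '.'.join(parts[:3]) + '.'; return ip
def trimIP_alt (ip : String) : String :=
  let parts := PySem.Chars.splitOn ip.toList ['.']
  if parts.length > 3 then
    String.ofList (PySem.Chars.join ['.'] (PySem.List.slice parts none (some 3)) ++ ['.'])
  else ip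

-- ===== PRECONDITION & SPEC =====
def Spec_trimIP (ip : String) (out : String) : Prop := out = trimIP_alt ip
instance (ip : String) (out : String) : Decidable (Spec_trimIP ip out) := by unfold Spec_trimIP; infer_instance

-- ===== CLAIM (what is proved, stated in full; the proofs are below) =====
def Claim_equal_trimIP : Prop := ∀ (ip : String), Dom_trimIP ip → Spec_trimIP ip (trimIP ip)

-- ===== LEMMAS AND PROOFS =====

-- simple structural recursion equivalent to single-char split on '.'
def mySplit : List Char → List (List Char)
  | [] => [[]]
  | c :: cs => if c = '.' then [] :: mySplit cs else (mySplit cs).modifyHead (c :: ·)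

lemma mySplit_cons_dot (rest : List Char) : mySplit ('.' :: rest) = [] :: mySplit rest := by
  simp [mySplit]

lemma mySplit_cons_ne (c : Char) (rest : List Char) (hc : ¬ c = '.') :
    mySplit (c :: rest) = (mySplit rest).modifyHead (c :: ·) := by
  simp [mySplit, hc]

lemma mySplit_ne_nil (cs : List Char) : mySplit cs ≠ [] := by
  induction cs with
  | nil => simp [mySplit]
  | cons c cs ih =>
    simp only [mySplit]
    split
    · simp
    · cases h : mySplit cs with
      | nil => exact absurd h ih
      | cons a b => simp

lemma splitOn_go_spec (fuel : Nat) :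
    ∀ (l cur : List Char) (accs : List (List Char)), l.length ≤ fuel →
    PySem.Chars.splitOn.go ['.'] fuel l cur accs =
      accs.reverse ++ (mySplit l).modifyHead (cur.reverse ++ ·) := by
  induction fuel with
  | zero =>
    intro l cur accs h
    have hl : l = [] := by cases l <;> simp_all
    subst hl
    simp [PySem.Chars.splitOn.go, mySplit, List.modifyHead]
  | succ n ih =>
    intro l cur accs h
    cases l with
    | nil => simp [PySem.Chars.splitOn.go, mySplit, List.modifyHead]
    | cons c rest =>
      simp only [PySem.Chars.splitOn.go]
      by_cases hc : c = '.'
      · subst hc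
        have hpre : List.isPrefixOf ['.'] ('.' :: rest) = true := by simp [List.isPrefixOf]
        rw [if_pos hpre]
        have hd : List.drop (['.'] : List Char).length ('.' :: rest) = rest := rfl
        rw [hd]
        rw [ih rest [] (cur.reverse :: accs) (by simpa using Nat.le_of_succ_le_succ h)]
        rw [mySplit_cons_dot]
        simp [List.modifyHead]
        cases mySplit rest <;> simp
      · have hpre : List.isPrefixOf ['.'] (c :: rest) = false := by
          simp [List.isPrefixOf]
          exact fun hx => hc hx.symm
        rw [if_neg (by simp [hpre])]
        rw [ih rest (c :: cur) accs (by simpa using Nat.le_of_succ_le_succ h)]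
        rw [mySplit_cons_ne c rest hc, List.modifyHead_modifyHead]
        congr 1
        cases hs : mySplit rest with
        | nil => exact absurd hs (mySplit_ne_nil rest)
        | cons a b => simp

lemma splitOn_eq_mySplit (cs : List Char) :
    PySem.Chars.splitOn cs ['.'] = mySplit cs := by
  show PySem.Chars.splitOn.go ['.'] (cs.length + 1) cs [] [] = _
  rw [splitOn_go_spec (cs.length + 1) cs [] [] (by omega)]
  cases hs : mySplit cs with
  | nil => exact absurd hs (mySplit_ne_nil cs)
  | cons a b => simp

-- the characters A's loop emits when `k` more periods remain before the break
def take3 : List Char → Nat → List Char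
  | _, 0 => []
  | [], _ + 1 => []
  | c :: rest, k + 1 => c :: take3 rest (if c = '.' then k else k + 1)

lemma trimGo_eq_take3 (cs : List Char) :
    ∀ (k : Nat) (acc : List Char), k ≤ 3 →
    trimGo cs (3 - k) acc = acc ++ take3 cs k := by
  induction cs with
  | nil => intro k acc _; cases k <;> simp [trimGo, take3]
  | cons c rest ih =>
    intro k acc hk
    cases k with
    | zero => simp [trimGo, take3]
    | succ k' =>
      have h3 : ¬ (3 - (k' + 1) = 3) := by omega
      by_cases hc : c = '.'
      · have h4 : (3 - (k' + 1)) + 1 = 3 - k' := by omega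
        simp only [trimGo, if_neg h3, if_pos hc, h4, take3]
        rw [ih k' (acc ++ [c]) (by omega)]
        simp
      · simp only [trimGo, if_neg h3, if_neg hc, take3]
        rw [ih (k' + 1) (acc ++ [c]) hk]
        simp

lemma join_modifyHead_cons (c : Char) (ps : List (List Char)) (h : ps ≠ []) :
    PySem.Chars.join ['.'] (ps.modifyHead (c :: ·)) = c :: PySem.Chars.join ['.'] ps := by
  cases ps with
  | nil => exact absurd rfl h
  | cons p rest =>
    cases rest with
    | nil => simp [List.modifyHead, PySem.Chars.join_singleton]
    | cons q r => simp [List.modifyHead, PySem.Chars.join_cons_cons]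

lemma take3_eq_split (cs : List Char) :
    ∀ (k : Nat), 1 ≤ k →
    take3 cs k = if (mySplit cs).length > k
      then PySem.Chars.join ['.'] ((mySplit cs).take k) ++ ['.'] else cs := by
  induction cs with
  | nil =>
    intro k hk
    have hno : ¬ ((mySplit ([] : List Char)).length > k) := by simp [mySplit]; omega
    rw [if_neg hno]
    cases k with
    | zero => omega
    | succ k' => simp [take3]
  | cons c rest ih =>
    intro k hk
    by_cases hc : c = '.'
    · subst hc
      rw [mySplit_cons_dot]
      cases k with
      | zero => omega
      | succ k' =>
        have hstep : take3 ('.' :: rest) (k' + 1) = '.' :: take3 rest k' := by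
          simp [take3]
        cases Nat.eq_zero_or_pos k' with
        | inl h0 =>
          subst h0
          have hlen : (([] :: mySplit rest) : List (List Char)).length > 1 := by
            cases hs : mySplit rest with
            | nil => exact absurd hs (mySplit_ne_nil rest)
            | cons a b => simp
          rw [if_pos hlen, hstep]
          simp [take3, PySem.Chars.join_singleton]
        | inr h1 =>
          rw [hstep, ih k' h1]
          by_cases hL : (mySplit rest).length > k'
          · have hlen : (([] :: mySplit rest) : List (List Char)).length > k' + 1 := by
              simpa using hL
            rw [if_pos hL, if_pos hlen]
            have htk : (([] :: mySplit rest) : List (List Char)).take (k' + 1)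
                = [] :: (mySplit rest).take k' := by simp
            rw [htk]
            have hne : (mySplit rest).take k' ≠ [] := by
              cases hs : mySplit rest with
              | nil => exact absurd hs (mySplit_ne_nil rest)
              | cons a b =>
                have : 0 < k' := h1
                cases k' with
                | zero => omega
                | succ m => simp
            cases hs : (mySplit rest).take k' with
            | nil => exact absurd hs hne
            | cons p ps => simp [PySem.Chars.join_cons_cons]
          · have hlen : ¬ ((([] :: mySplit rest) : List (List Char)).length > k' + 1) := by
              simpa using hL
            rw [if_neg hL, if_neg hlen]
    · rw [mySplit_cons_ne c rest hc]
      cases k with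
      | zero => omega
      | succ k' =>
        have hstep : take3 (c :: rest) (k' + 1) = c :: take3 rest (k' + 1) := by
          simp [take3, hc]
        rw [hstep, ih (k' + 1) (by omega)]
        have hlenM : (((mySplit rest).modifyHead (c :: ·))).length = (mySplit rest).length := by
          simp
        by_cases hL : (mySplit rest).length > k' + 1
        · rw [if_pos hL, if_pos (by rw [hlenM]; exact hL)]
          rw [List.take_modifyHead]
          have hne : (mySplit rest).take (k' + 1) ≠ [] := by
            cases hs : mySplit rest with
            | nil => exact absurd hs (mySplit_ne_nil rest)
            | cons a b => simp
          rw [join_modifyHead_cons c _ hne]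
          simp
        · rw [if_neg hL, if_neg (by rw [hlenM]; exact hL)]

-- ===== VERDICT (by name: the statement is the Claim_ definition above) =====
theorem trimIP_spec : Claim_equal_trimIP := by
  intro ip _
  show trimIP ip = trimIP_alt ip
  unfold trimIP trimIP_alt
  rw [splitOn_eq_mySplit]
  have h0 : trimGo ip.toList 0 [] = take3 ip.toList 3 := by
    have := trimGo_eq_take3 ip.toList 3 [] (by omega)
    simpa using this
  rw [h0, take3_eq_split ip.toList 3 (by omega)]
  by_cases hL : (mySplit ip.toList).length > 3
  · rw [if_pos hL]
    simp only [if_pos hL]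
    rw [PySem.List.slice_to (mySplit ip.toList) (by norm_num : (0:Int) ≤ 3)]
    rfl
  · rw [if_neg hL]
    simp only [if_neg hL]
    exact (String.ofList_toList).symm ▸ rfl
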